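-- pv_equiv track=rewrite | github.com/willnguyen1312/Fossil-Coding-Spring-2018 | src/problem18/gentest-18.py | remove_invalid_characters
-- ===== SOURCE A (Python) =====
-- characters_maps = ['0','1','2','3','4','5','6','7','8','9','a','b','c','d','e','f','g','h','i','j','k','l','m','n','o','p','q','r','s','t','u','v','w','x','y','z']
--
-- def remove_invalid_characters(input):
-- 	characters = list(input)
-- 	i = 0
-- 	while(i < len(characters)):
-- 		if not characters[i] in characters_maps:
-- 			del characters[i]
-- 		else:
-- 			i += 1
-- 	return ''.join(characters)
-- ===== SOURCE B (Python) =====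
-- def remove_invalid_characters(input):
--     return ''.join(c for c in input if '0' <= c <= '9' or 'a' <= c <= 'z')
-- ===== Notes on version B (the rewrite author's own statement) =====
-- stated objective: faster
-- what changed: Replace the index-maintaining while-loop with in-place del on a list by a single-pass generator comprehension filtering on character ranges, joined once.
import Mathlib
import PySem

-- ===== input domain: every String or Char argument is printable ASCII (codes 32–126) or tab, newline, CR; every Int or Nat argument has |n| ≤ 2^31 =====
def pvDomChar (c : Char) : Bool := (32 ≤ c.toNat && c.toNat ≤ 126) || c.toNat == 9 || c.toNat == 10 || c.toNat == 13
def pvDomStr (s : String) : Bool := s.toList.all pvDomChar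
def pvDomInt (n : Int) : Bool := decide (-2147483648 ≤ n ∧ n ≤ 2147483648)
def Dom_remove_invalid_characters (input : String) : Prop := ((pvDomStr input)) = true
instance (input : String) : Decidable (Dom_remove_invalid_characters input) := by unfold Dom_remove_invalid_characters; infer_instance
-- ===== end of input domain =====

-- B replaces A's index-maintaining while-loop with in-place deletion by a single-pass filter; faster (linear vs quadratic worst case).

-- ===== PORT A =====
-- module-level constant characters_maps
def characters_maps : List Char :=
  ['0','1','2','3','4','5','6','7','8','9','a','b','c','d','e','f','g','h','i','j','k','l','m','n','o','p','q','r','s','t','u','v','w','x','y','z']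

-- the while-loop: i scans characters, deleting characters[i] when it is not in characters_maps
def rmLoopA (characters : List Char) (i : Nat) : List Char :=
  if h : i < characters.length then
    if ¬ (characters[i] ∈ characters_maps) then
      rmLoopA (characters.eraseIdx i) i
    else
      rmLoopA characters (i + 1)
  else characters
termination_by 2 * characters.length - i
decreasing_by
  · simp [List.length_eraseIdx, h]; omega
  · omega

def remove_invalid_characters (input : String) : String :=
  String.mk (rmLoopA input.toList 0)

-- ===== PORT B =====
def remove_invalid_characters_alt (input : String) : String :=
  String.mk (input.toList.filter (fun c => ('0' ≤ c && c ≤ '9') || ('a' ≤ c && c ≤ 'z')))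

-- ===== PRECONDITION & SPEC =====
def Spec_remove_invalid_characters (input : String) (out : String) : Prop := out = remove_invalid_characters_alt input
instance (input : String) (out : String) : Decidable (Spec_remove_invalid_characters input out) := by unfold Spec_remove_invalid_characters; infer_instance

-- ===== CLAIM (what is proved, stated in full; the proofs are below) =====
def Claim_equal_remove_invalid_characters : Prop := ∀ (input : String), Dom_remove_invalid_characters input → Spec_remove_invalid_characters input (remove_invalid_characters input)

-- ===== LEMMAS AND PROOFS =====

-- A's membership test agrees with B's range test on every character
theorem mem_characters_maps_iff (c : Char) :
    (c ∈ characters_maps) ↔ (('0' ≤ c && c ≤ '9') || ('a' ≤ c && c ≤ 'z')) = true := by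
  simp [characters_maps, Char.le_def, Char.ext_iff, UInt32.le_iff_toNat_le, UInt32.ext_iff]
  omega

-- invariant of A's loop: the prefix below i is kept, the suffix is filtered
theorem rmLoopA_eq (characters : List Char) (i : Nat) :
    rmLoopA characters i =
      characters.take i ++ (characters.drop i).filter (fun c => decide (c ∈ characters_maps)) := by
  fun_induction rmLoopA characters i with
  | case1 cs i h hmem ih =>
      rw [ih]
      have hm : min i cs.length = i := by omega
      have ht : (cs.eraseIdx i).take i = cs.take i := by
        simp [List.eraseIdx_eq_take_drop_succ, hm]
      have hd : (cs.eraseIdx i).drop i = cs.drop (i + 1) := by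
        simp [List.eraseIdx_eq_take_drop_succ, hm]
      have hdi : cs.drop i = cs[i] :: cs.drop (i + 1) := List.drop_eq_getElem_cons h
      rw [ht, hd, hdi, List.filter_cons]
      simp only [decide_eq_false hmem, Bool.false_eq_true, if_false]
  | case2 cs i h hmem ih =>
      rw [ih]
      have hdi : cs.drop i = cs[i] :: cs.drop (i + 1) := List.drop_eq_getElem_cons h
      have hti : cs.take (i + 1) = cs.take i ++ [cs[i]] := List.take_succ_eq_append_getElem h
      rw [hdi, hti, List.filter_cons]
      simp only [decide_eq_true_eq]
      rw [if_pos (not_not.mp hmem), List.append_assoc, List.singleton_append]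
  | case3 cs i h =>
      have : cs.length ≤ i := by omega
      simp [List.take_of_length_le this, List.drop_of_length_le this]

-- ===== VERDICT (by name: the statement is the Claim_ definition above) =====
theorem remove_invalid_characters_spec : Claim_equal_remove_invalid_characters := by
  intro input _
  show _ = _
  unfold remove_invalid_characters remove_invalid_characters_alt
  rw [rmLoopA_eq]
  simp only [List.take_zero, List.drop_zero, List.nil_append]
  congr 1
  apply List.filter_congr
  intro c _
  simp [mem_characters_maps_iff]
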